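-- pv_equiv track=rewrite | github.com/patrickfrey/strusWikipediaSearch | scripts/strusnlp.py | getDocumentNnpSexMap
-- ===== SOURCE A (Python) =====
-- def getMaxSexCount( sexCountMap):
--     rt = None
--     max = 0
--     values = []
--     for sex,cnt in sexCountMap.items():
--         values.append( cnt)
--         if cnt > max:
--             max = cnt
--             rt = sex
--     values.sort( reverse=True)
--     if len(values) >= 2 and values[0] <= values[1] * 2:
--         return None
--     if len(values) >= 1 and values[0] <= 2.0:
--         return None
--     return rt
--
-- def getDocumentNnpSexMap( map):
--     rt = {}
--     for nnp,sexCountMap in map.items():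
--         maxsex = getMaxSexCount( sexCountMap)
--         if maxsex:
--             if ',' in nnp and maxsex != 'P':
--                 continue
--             rt[ nnp] = maxsex
--     return rt
-- ===== SOURCE B (Python) =====
-- def _dominant(scm):
--     if not scm:
--         return None
--     cnts = list(scm.values())
--     m1 = max(cnts)
--     if m1 <= 2:
--         return None
--     if len(cnts) >= 2:
--         rest = list(cnts)
--         rest.remove(m1)
--         if m1 <= max(rest) * 2:
--             return None
--     for sex, cnt in scm.items():
--         if cnt == m1:
--             return sex
--
-- def getDocumentNnpSexMap(map):
--     pairs = [(nnp, s)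
--              for nnp, s in ((nnp, _dominant(scm)) for nnp, scm in map.items())
--              if s and (',' not in nnp or s == 'P')]
--     return dict(pairs)
-- ===== Notes on version B (the rewrite author's own statement) =====
-- stated objective: alternative
-- what changed: getMaxSexCount's build-a-list-then-sort top-two selection is replaced by direct computation: max of the counts, the second max via remove-one-occurrence-and-max, early threshold exits, and a separate first-match scan for the dominant sex; the outer loop becomes a filtering comprehension collected into a dict at the end instead of incremental dict insertion.
import Mathlib
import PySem

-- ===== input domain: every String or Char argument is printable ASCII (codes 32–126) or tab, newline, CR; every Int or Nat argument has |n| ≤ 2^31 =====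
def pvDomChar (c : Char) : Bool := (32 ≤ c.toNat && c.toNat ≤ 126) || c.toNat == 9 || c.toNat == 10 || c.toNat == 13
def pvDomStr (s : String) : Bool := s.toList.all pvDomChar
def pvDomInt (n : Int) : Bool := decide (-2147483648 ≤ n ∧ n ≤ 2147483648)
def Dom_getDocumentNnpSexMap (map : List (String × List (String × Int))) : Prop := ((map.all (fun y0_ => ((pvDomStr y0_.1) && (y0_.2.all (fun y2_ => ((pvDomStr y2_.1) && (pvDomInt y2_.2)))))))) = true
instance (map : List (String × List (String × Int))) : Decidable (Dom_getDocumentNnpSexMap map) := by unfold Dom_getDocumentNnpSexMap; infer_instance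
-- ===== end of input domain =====

-- B replaces getMaxSexCount's build-list-then-sort top-two selection by direct max /
-- second-max computation with a separate first-match scan, and collects the outer
-- results by a filtering comprehension turned into a dict at the end.

-- ===== PORT A =====
-- port of getMaxSexCount: append every count to `values`, track running strict max (from 0),
-- sort `values` descending, then apply the two threshold checks.
def getMaxSexCountA (scm : List (String × Int)) : Option String :=
  let st := scm.foldl
    (fun (s : Option String × Int × List Int) p =>
      let values := s.2.2 ++ [p.2]
      if s.2.1 < p.2 then (some p.1, p.2, values) else (s.1, s.2.1, values))
    (none, 0, [])
  match PySem.List.sorted st.2.2 (fun x => x) true with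
  | v0 :: v1 :: _ => if v0 ≤ v1 * 2 then none else if v0 ≤ 2 then none else st.1
  | [v0] => if v0 ≤ 2 then none else st.1
  | [] => st.1

def getDocumentNnpSexMap (map : List (String × List (String × Int))) : List (String × String) :=
  (map.foldl
    (fun (rt : PySem.Dict String String) p =>
      match getMaxSexCountA p.2 with
      | none => rt
      | some s =>
        if s = "" then rt
        else if PySem.Str.isIn "," p.1 = true ∧ s ≠ "P" then rt
        else rt.insert p.1 s)
    PySem.Dict.empty).items

-- ===== PORT B =====
-- port of _dominant: m1 = max(counts); early exits on the thresholds (second max via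
-- remove-one-occurrence-then-max); final scan returns the first sex whose count is m1.
def dominantB (scm : List (String × Int)) : Option String :=
  if scm.isEmpty then none
  else
    let cnts := scm.map Prod.snd
    match PySem.List.max? cnts (fun x => x) with
    | none => none  -- unreachable: cnts is nonempty
    | some m1 =>
      if m1 ≤ 2 then none
      else if 2 ≤ cnts.length then
        match PySem.List.remove? cnts m1 with
        | none => none  -- unreachable: m1 ∈ cnts
        | some rest =>
          match PySem.List.max? rest (fun x => x) with
          | none => none  -- unreachable: rest is nonempty
          | some m2 =>
            if m1 ≤ m2 * 2 then none
            else (scm.find? (fun p => decide (p.2 = m1))).map Prod.fst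
      else (scm.find? (fun p => decide (p.2 = m1))).map Prod.fst

-- the comprehension's filter: keep (nnp, s) when s is truthy and (',' not in nnp or s == 'P')
def keepB (p : String × List (String × Int)) : Option (String × String) :=
  match dominantB p.2 with
  | none => none
  | some s =>
    if s ≠ "" ∧ (¬ PySem.Str.isIn "," p.1 = true ∨ s = "P") then some (p.1, s) else none

def getDocumentNnpSexMap_alt (map : List (String × List (String × Int))) : List (String × String) :=
  (PySem.Dict.ofList (map.filterMap keepB)).items

-- ===== PRECONDITION & SPEC =====
def Spec_getDocumentNnpSexMap (map : List (String × List (String × Int))) (out : List (String × String)) : Prop := out = getDocumentNnpSexMap_alt map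
instance (map : List (String × List (String × Int))) (out : List (String × String)) : Decidable (Spec_getDocumentNnpSexMap map out) := by unfold Spec_getDocumentNnpSexMap; infer_instance

-- ===== CLAIM (what is proved, stated in full; the proofs are below) =====
def Claim_equal_getDocumentNnpSexMap : Prop := ∀ (map : List (String × List (String × Int))), Dom_getDocumentNnpSexMap map → Spec_getDocumentNnpSexMap map (getDocumentNnpSexMap map)

-- ===== LEMMAS AND PROOFS =====

-- The multiset maximum of the counts, the second maximum, and the first strict argmax.
def pvM1 (l : List Int) : Option Int := l.max?
def pvM2 (l : List Int) : Option Int :=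
  match l.max? with
  | none => none
  | some m => (l.erase m).max?
def pvRT (scm : List (String × Int)) : Option String :=
  match (scm.map Prod.snd).max? with
  | none => none
  | some m => (scm.find? (fun p => decide (p.2 = m))).map Prod.fst

theorem max?_concat (l : List Int) (c : Int) :
    (l ++ [c]).max? = some (match l.max? with | none => c | some m => max m c) := by
  induction l with
  | nil => simp
  | cons a l ih =>
    rw [List.cons_append, List.max?_cons, List.max?_cons, ih]
    cases h : l.max? <;> simp [max_assoc]

theorem sorted_head (l : List Int) (v0 : Int) (t : List Int)
    (h : PySem.List.sorted l (fun x => x) true = v0 :: t) : pvM1 l = some v0 := by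
  have hmem : v0 ∈ l := (PySem.List.mem_sorted l _ true v0).1 (h ▸ List.mem_cons_self ..)
  have hub := PySem.List.key_head_sorted_rev_ge (xs := l) (key := fun x : Int => x) (m := v0) (t := t) h
  exact List.max?_eq_some_iff.2 ⟨hmem, hub⟩

theorem sorted_second (l : List Int) (v0 v1 : Int) (t : List Int)
    (h : PySem.List.sorted l (fun x => x) true = v0 :: v1 :: t) : pvM2 l = some v1 := by
  have h1 : pvM1 l = some v0 := sorted_head l v0 (v1 :: t) h
  have hperm : List.Perm (v0 :: v1 :: t) l := h ▸ PySem.List.sorted_perm l _ true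
  have hpe : List.Perm (v1 :: t) (l.erase v0) := (List.cons_perm_iff_perm_erase.1 hperm).2
  have hp : (v0 :: v1 :: t).Pairwise (fun a b => b ≤ a) := by
    have := PySem.List.sorted_pairwise_rev l (fun x : Int => x)
    rwa [h] at this
  have hub : ∀ y ∈ l.erase v0, y ≤ v1 := by
    intro y hy
    have : y ∈ v1 :: t := hpe.mem_iff.2 hy
    rcases List.mem_cons.1 this with hy' | hy'
    · exact le_of_eq hy'
    · exact (List.pairwise_cons.1 (List.pairwise_cons.1 hp).2).1 y hy'
  have hmem : v1 ∈ l.erase v0 := hpe.mem_iff.1 (List.mem_cons_self ..)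
  unfold pvM2
  rw [show l.max? = some v0 from h1]
  exact List.max?_eq_some_iff.2 ⟨hmem, hub⟩

-- find? is unchanged by appending an element whose count does not beat the max
theorem find?_concat_le (l : List (String × Int)) (p : String × Int) (v1 : Int)
    (h1 : (l.map Prod.snd).max? = some v1) :
    (l ++ [p]).find? (fun q => decide (q.2 = v1)) = l.find? (fun q => decide (q.2 = v1)) := by
  have hmem : v1 ∈ l.map Prod.snd := (List.max?_eq_some_iff.1 h1).1
  obtain ⟨q, hq, hq2⟩ := List.mem_map.1 hmem
  rw [List.find?_append]
  have : (l.find? (fun q => decide (q.2 = v1))).isSome := by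
    rw [List.find?_isSome]
    exact ⟨q, hq, by simp [hq2]⟩
  rcases hsome : l.find? (fun q => decide (q.2 = v1)) with _ | r
  · rw [hsome] at this; simp at this
  · rw [hsome]; rfl

theorem find?_concat_gt (l : List (String × Int)) (p : String × Int) (m : Option Int)
    (h1 : (l.map Prod.snd).max? = m) (hgt : ∀ v1, m = some v1 → v1 < p.2) :
    (l ++ [p]).find? (fun q => decide (q.2 = p.2)) = some p := by
  rw [List.find?_append]
  have hnone : l.find? (fun q => decide (q.2 = p.2)) = none := by
    rw [List.find?_eq_none]
    intro x hx
    rcases m with _ | v1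
    · have : l.map Prod.snd = [] := List.max?_eq_none_iff.1 h1
      simp [List.map_eq_nil_iff.1 this] at hx
    · have hle := (List.max?_eq_some_iff.1 h1).2 x.2 (List.mem_map.2 ⟨x, hx, rfl⟩)
      have := hgt v1 rfl
      simp; omega
  rw [hnone]
  simp

theorem foldA_spec (scm : List (String × Int)) :
    scm.foldl
      (fun (s : Option String × Int × List Int) p =>
        let values := s.2.2 ++ [p.2]
        if s.2.1 < p.2 then (some p.1, p.2, values) else (s.1, s.2.1, values))
      (none, 0, [])
    = ((match pvM1 (scm.map Prod.snd) with
        | some m => if 0 < m then pvRT scm else none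
        | none => none),
       (match pvM1 (scm.map Prod.snd) with
        | some m => max 0 m
        | none => 0),
       scm.map Prod.snd) := by
  induction scm using List.reverseRecOn with
  | nil => rfl
  | append_singleton l p ih =>
    rw [List.foldl_append, ih, List.foldl_cons, List.foldl_nil]
    rcases h1 : pvM1 (l.map Prod.snd) with _ | v1
    · have : l.map Prod.snd = [] := List.max?_eq_none_iff.1 h1
      have hl : l = [] := List.map_eq_nil_iff.1 this
      subst hl
      by_cases hp : (0 : Int) < p.2
      · have : max 0 p.2 = p.2 := by omega
        simp [pvM1, pvRT, hp, this]
      · have : max 0 p.2 = 0 := by omega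
        simp [pvM1, hp, this]
    · have hmem : v1 ∈ l.map Prod.snd := (List.max?_eq_some_iff.1 (h1 ▸ rfl : (l.map Prod.snd).max? = some v1)).1
      have hM1' : pvM1 (l.map Prod.snd ++ [p.2]) = some (max v1 p.2) := by
        simp only [pvM1]
        rw [max?_concat]
        simp [show (l.map Prod.snd).max? = some v1 from h1]
      simp only [pvM1] at h1
      by_cases hlt : max 0 v1 < p.2
      · have hmax : max v1 p.2 = p.2 := by omega
        have hRT' : pvRT (l ++ [p]) = some p.1 := by
          simp only [pvRT, List.map_append, List.map_cons, List.map_nil]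
          rw [max?_concat]
          simp only [h1, hmax]
          rw [find?_concat_gt l p (some v1) h1 (by intro v hv; cases hv; omega)]
          rfl
        have h0 : (0 : Int) < p.2 := by omega
        have hmx : max 0 (max v1 p.2) = p.2 := by omega
        simp [hlt, hM1', hRT', hmax, h0]
        omega
      · have hmx : max 0 (max v1 p.2) = max 0 v1 := by omega
        by_cases h0 : (0 : Int) < v1
        · have hmax : max v1 p.2 = v1 := by omega
          have hRT' : pvRT (l ++ [p]) = pvRT l := by
            simp only [pvRT, List.map_append, List.map_cons, List.map_nil]
            rw [max?_concat]
            simp only [h1, hmax]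
            rw [find?_concat_le l p v1 h1]
          simp [hlt, hM1', hRT', hmax, h0]
        · have hne : ¬ (0 : Int) < max v1 p.2 := by omega
          simp [hlt, hM1', hmx, h0, hne]

-- PySem's max with the identity key is the multiset maximum.
theorem pymax_id (l : List Int) : PySem.List.max? l (fun x => x) = l.max? := by
  cases l with
  | nil => rfl
  | cons a t => rw [PySem.List.max?_id_cons]; simp [List.max?]

theorem inner_eq (scm : List (String × Int)) : getMaxSexCountA scm = dominantB scm := by
  simp only [getMaxSexCountA, dominantB, foldA_spec]
  have hperm := PySem.List.sorted_perm (scm.map Prod.snd) (fun x : Int => x) true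
  rcases hs : PySem.List.sorted (scm.map Prod.snd) (fun x => x) true with _ | ⟨v0, _ | ⟨v1, t⟩⟩
  · have hnil : scm.map Prod.snd = [] := (PySem.List.sorted_eq_nil_iff _ _ _).1 hs
    have : scm = [] := List.map_eq_nil_iff.1 hnil
    subst this
    rfl
  · rw [hs] at hperm
    have h1 : pvM1 (scm.map Prod.snd) = some v0 := sorted_head _ _ _ hs
    have hlen : scm.length = 1 := by simpa using hperm.symm.length_eq
    have hne : ¬ scm.isEmpty := by
      cases scm with
      | nil => simp at hlen
      | cons a t => simp
    rw [pymax_id]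
    simp only [hne, show (scm.map Prod.snd).max? = some v0 from h1]
    have hnot2 : ¬ (2 ≤ scm.length) := by omega
    by_cases hv : v0 ≤ 2
    · simp [hv]
    · have h0 : (0:Int) < v0 := by omega
      simp [hv, hnot2, h0, h1]
      unfold pvRT
      rw [show (scm.map Prod.snd).max? = some v0 from h1]
  · rw [hs] at hperm
    have h1 : pvM1 (scm.map Prod.snd) = some v0 := sorted_head _ _ _ hs
    have h2 : pvM2 (scm.map Prod.snd) = some v1 := sorted_second _ _ _ _ hs
    have hlen : 2 ≤ scm.length := by
      have := hperm.symm.length_eq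
      simp at this
      omega
    have hne : ¬ scm.isEmpty := by
      cases scm with
      | nil => simp at hlen
      | cons a t => simp
    have hmem : v0 ∈ scm.map Prod.snd := (List.max?_eq_some_iff.1 h1).1
    have hrem : PySem.List.remove? (scm.map Prod.snd) v0 = some ((scm.map Prod.snd).erase v0) :=
      PySem.List.remove?_eq_some_erase _ _ hmem
    have herase : ((scm.map Prod.snd).erase v0).max? = some v1 := by
      have := h2; unfold pvM2 at this
      rw [show (scm.map Prod.snd).max? = some v0 from h1] at this
      exact this
    rw [pymax_id]
    simp only [hne, show (scm.map Prod.snd).max? = some v0 from h1,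
      hrem, pymax_id, herase]
    by_cases hv2 : v0 ≤ v1 * 2
    · by_cases hv : v0 ≤ 2
      · simp [hv, hv2]
      · simp [hv, hv2]
        intro h
        omega
    · by_cases hv : v0 ≤ 2
      · simp [hv, hv2]
      · have h0 : (0:Int) < v0 := by omega
        simp [hv, hv2, h0, h1]
        unfold pvRT
        rw [show (scm.map Prod.snd).max? = some v0 from h1]

theorem outer_fold (l : List (String × List (String × Int))) (d : PySem.Dict String String) :
    l.foldl
      (fun (rt : PySem.Dict String String) p =>
        match getMaxSexCountA p.2 with
        | none => rt
        | some s =>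
          if s = "" then rt
          else if PySem.Str.isIn "," p.1 = true ∧ s ≠ "P" then rt
          else rt.insert p.1 s)
      d
    = (l.filterMap keepB).foldl (fun acc p => acc.insert p.1 p.2) d := by
  induction l generalizing d with
  | nil => rfl
  | cons a l ih =>
    rw [List.foldl_cons, List.filterMap_cons]
    have hB : dominantB a.2 = getMaxSexCountA a.2 := (inner_eq a.2).symm
    rcases hA : getMaxSexCountA a.2 with _ | s
    · rw [hA] at hB
      have hk : keepB a = none := by simp [keepB, hB]
      rw [hk]
      exact ih d
    · rw [hA] at hB
      by_cases hse : s = ""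
      · have hk : keepB a = none := by simp [keepB, hB, hse]
        rw [hk]
        rw [show (match some s with
              | none => d
              | some s => if s = "" then d else if PySem.Str.isIn "," a.1 = true ∧ s ≠ "P" then d else d.insert a.1 s)
            = d from by
              show (if s = "" then d else if PySem.Str.isIn "," a.1 = true ∧ s ≠ "P" then d else d.insert a.1 s) = d
              rw [if_pos hse]]
        exact ih d
      · by_cases hskip : PySem.Str.isIn "," a.1 = true ∧ s ≠ "P"
        · have hk : keepB a = none := by
            simp only [keepB, hB]
            exact if_neg (by
              rintro ⟨-, h | h⟩
              · exact h hskip.1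
              · exact hskip.2 h)
          rw [hk]
          rw [show (match some s with
                | none => d
                | some s => if s = "" then d else if PySem.Str.isIn "," a.1 = true ∧ s ≠ "P" then d else d.insert a.1 s)
              = d from by
                show (if s = "" then d else if PySem.Str.isIn "," a.1 = true ∧ s ≠ "P" then d else d.insert a.1 s) = d
                rw [if_neg hse, if_pos hskip]]
          exact ih d
        · have hcond : s ≠ "" ∧ (¬ PySem.Str.isIn "," a.1 = true ∨ s = "P") := by
            refine ⟨hse, ?_⟩
            by_cases hc : PySem.Str.isIn "," a.1 = true
            · right
              by_contra hP
              exact hskip ⟨hc, hP⟩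
            · left; exact hc
          have hk : keepB a = some (a.1, s) := by
            simp only [keepB, hB]
            exact if_pos hcond
          rw [hk]
          rw [show (match some s with
                | none => d
                | some s => if s = "" then d else if PySem.Str.isIn "," a.1 = true ∧ s ≠ "P" then d else d.insert a.1 s)
              = d.insert a.1 s from by
                show (if s = "" then d else if PySem.Str.isIn "," a.1 = true ∧ s ≠ "P" then d else d.insert a.1 s) = d.insert a.1 s
                rw [if_neg hse, if_neg hskip], List.foldl_cons]
          exact ih (d.insert a.1 s)

-- ===== VERDICT (by name: the statement is the Claim_ definition above) =====
theorem getDocumentNnpSexMap_spec : Claim_equal_getDocumentNnpSexMap := by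
  intro map _
  show getDocumentNnpSexMap map = getDocumentNnpSexMap_alt map
  unfold getDocumentNnpSexMap getDocumentNnpSexMap_alt
  rw [outer_fold]
  rfl
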